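-- pv_equiv track=rewrite | github.com/maciej3031/whale-recognition-challenge | utils/data_generators.py | _get_all_triplets
-- ===== SOURCE A (Python) =====
-- def _get_all_triplets(positives, all_whales_list):
--     """
--     Create all possible triplets given list of positives pairs and all whales list
--     :param positives: Numpy array with shape (n,3) or List of 3-element tuples
--     (Positive pairs of images names and whale Id)
--     :param all_whales_list: Numpy array with shape (n,2) or List of 2-element tuples,
--     that are all possible whale images and IDs
--     :return: List o 3-element Tuples
--     """
--     triplets = []
--     for a in positives:
--         A_name, P_name, A_id = a
--         for N_name, N_id in all_whales_list:
--             if A_id != N_id: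
--                 triplets.append((A_name, P_name, N_name))
--     return triplets
-- ===== SOURCE B (Python) =====
-- def _get_all_triplets(positives, all_whales_list):
--     cache = {}
--     triplets = []
--     for A_name, P_name, A_id in positives:
--         negs = cache.get(A_id)
--         if negs is None:
--             negs = [N_name for N_name, N_id in all_whales_list if A_id != N_id]
--             cache[A_id] = negs
--         for N_name in negs:
--             triplets.append((A_name, P_name, N_name))
--     return triplets
-- ===== Notes on version B (the rewrite author's own statement) =====
-- stated objective: alternative
-- what changed: B builds a per-id cache of the non-matching whale-name list once per distinct anchor id and reuses it, instead of rescanning all_whales_list with the nested filter loop for every positive pair.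
import Mathlib
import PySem

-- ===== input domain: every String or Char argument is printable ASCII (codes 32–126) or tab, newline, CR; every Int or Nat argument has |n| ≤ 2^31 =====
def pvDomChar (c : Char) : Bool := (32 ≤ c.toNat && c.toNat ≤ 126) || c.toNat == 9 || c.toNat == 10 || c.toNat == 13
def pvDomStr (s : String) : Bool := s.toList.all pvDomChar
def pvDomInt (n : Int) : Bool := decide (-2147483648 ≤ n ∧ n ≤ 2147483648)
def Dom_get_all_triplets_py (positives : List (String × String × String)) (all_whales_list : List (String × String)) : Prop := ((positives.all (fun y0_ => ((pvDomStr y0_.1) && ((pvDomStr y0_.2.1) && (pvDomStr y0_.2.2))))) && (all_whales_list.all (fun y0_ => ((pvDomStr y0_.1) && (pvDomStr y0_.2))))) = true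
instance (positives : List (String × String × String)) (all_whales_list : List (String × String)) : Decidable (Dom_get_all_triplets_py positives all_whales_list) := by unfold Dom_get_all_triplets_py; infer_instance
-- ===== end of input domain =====

-- B caches, per distinct anchor id, the list of non-matching whale names and reuses it
-- instead of rescanning all_whales_list with the nested filter loop for every positive
-- pair (objective: alternative decomposition; same output, order preserved).


-- ===== PORT A =====
def get_all_triplets_py (positives : List (String × String × String)) (all_whales_list : List (String × String)) : List (String × String × String) :=
  positives.foldl (fun triplets a =>
    all_whales_list.foldl (fun triplets w =>
      if a.2.2 != w.2 then triplets ++ [(a.1, a.2.1, w.1)] else triplets) triplets) []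

-- ===== PORT B =====
-- the list comprehension [N_name for N_name, N_id in all_whales_list if A_id != N_id]
def pvNegs (all_whales_list : List (String × String)) (a_id : String) : List String :=
  (all_whales_list.filter (fun w => a_id != w.2)).map (·.1)

-- B's main loop: recursion over positives carrying the cache dict and the triplets accumulator
def pvAltLoop (all_whales_list : List (String × String)) :
    List (String × String × String) → PySem.Dict String (List String) →
    List (String × String × String) → List (String × String × String)
  | [], _, triplets => triplets
  | a :: rest, cache, triplets =>
    match cache.get? a.2.2 with
    | some negs =>
        pvAltLoop all_whales_list rest cache (triplets ++ negs.map (fun n => (a.1, a.2.1, n)))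
    | none =>
        let negs := pvNegs all_whales_list a.2.2
        pvAltLoop all_whales_list rest (cache.insert a.2.2 negs)
          (triplets ++ negs.map (fun n => (a.1, a.2.1, n)))

def get_all_triplets_py_alt (positives : List (String × String × String)) (all_whales_list : List (String × String)) : List (String × String × String) :=
  pvAltLoop all_whales_list positives PySem.Dict.empty []

-- ===== PRECONDITION & SPEC =====
def Spec_get_all_triplets_py (positives : List (String × String × String)) (all_whales_list : List (String × String)) (out : List (String × String × String)) : Prop := out = get_all_triplets_py_alt positives all_whales_list
instance (positives : List (String × String × String)) (all_whales_list : List (String × String)) (out : List (String × String × String)) : Decidable (Spec_get_all_triplets_py positives all_whales_list out) := by unfold Spec_get_all_triplets_py; infer_instance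

-- ===== CLAIM (what is proved, stated in full; the proofs are below) =====
def Claim_equal_get_all_triplets_py : Prop := ∀ (positives : List (String × String × String)) (all_whales_list : List (String × String)), Dom_get_all_triplets_py positives all_whales_list → Spec_get_all_triplets_py positives all_whales_list (get_all_triplets_py positives all_whales_list)

-- ===== LEMMAS AND PROOFS =====

-- A's inner loop over all_whales_list appends exactly the mapped non-matching names
theorem pv_inner_eq (a : String × String × String) (all_whales_list : List (String × String))
    (triplets : List (String × String × String)) :
    all_whales_list.foldl (fun triplets w =>
      if a.2.2 != w.2 then triplets ++ [(a.1, a.2.1, w.1)] else triplets) triplets =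
    triplets ++ (pvNegs all_whales_list a.2.2).map (fun n => (a.1, a.2.1, n)) := by
  induction all_whales_list generalizing triplets with
  | nil => simp [pvNegs]
  | cons w ws ih =>
    simp only [List.foldl_cons]
    by_cases h : a.2.2 != w.2
    · rw [if_pos h, ih]
      simp [pvNegs, h]
    · rw [if_neg h, ih]
      simp [pvNegs, h]

-- B's loop, under the cache invariant, computes the same left fold as A
theorem pvAltLoop_eq (all_whales_list : List (String × String))
    (ps : List (String × String × String)) (cache : PySem.Dict String (List String))
    (triplets : List (String × String × String))
    (hinv : ∀ k l, cache.get? k = some l → l = pvNegs all_whales_list k) :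
    pvAltLoop all_whales_list ps cache triplets =
    ps.foldl (fun triplets a => triplets ++ (pvNegs all_whales_list a.2.2).map (fun n => (a.1, a.2.1, n))) triplets := by
  induction ps generalizing cache triplets with
  | nil => rfl
  | cons a rest ih =>
    cases hc : cache.get? a.2.2 with
    | some negs =>
      have hn := hinv _ _ hc
      simp only [pvAltLoop, hc, List.foldl_cons, hn]
      exact ih _ _ hinv
    | none =>
      simp only [pvAltLoop, hc, List.foldl_cons]
      apply ih
      intro k l hk
      rw [PySem.Dict.get?_insert] at hk
      rcases eq_or_ne k a.2.2 with rfl | hne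
      · simp at hk
        exact hk.symm
      · rw [if_neg hne] at hk
        exact hinv _ _ hk

-- ===== VERDICT (by name: the statement is the Claim_ definition above) =====
theorem get_all_triplets_py_spec : Claim_equal_get_all_triplets_py := by
  intro positives all_whales_list _
  unfold Spec_get_all_triplets_py get_all_triplets_py get_all_triplets_py_alt
  rw [pvAltLoop_eq all_whales_list positives PySem.Dict.empty []
    (fun k l hk => by simp [PySem.Dict.get?_empty] at hk)]
  congr 1
  funext triplets a
  exact pv_inner_eq a all_whales_list triplets
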